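-- pv_equiv track=rewrite | github.com/b00kkk/algorithm | Baekjoon/2024_11/1125_표적지_옮기기.py | starting
-- ===== SOURCE A (Python) =====
-- def score(x, y):
--     if x == 0 or x == 18 or y == 0 or y == 18:
--         return 1
--     elif x == 1 or x == 17 or y == 1 or y == 17:
--         return 2
--     elif x == 2 or x == 16 or y == 2 or y == 16:
--         return 3
--     elif x == 3 or x == 15 or y == 3 or y == 15:
--         return 4
--     elif x == 4 or x == 14 or y == 4 or y == 14:
--         return 5
--     elif x == 5 or x == 13 or y == 5 or y == 13:
--         return 6
--     elif x == 6 or x == 12 or y == 6 or y == 12: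
--         return 7
--     elif x == 7 or x == 11 or y == 7 or y == 11:
--         return 8
--     elif x == 8 or x == 10 or y == 8 or y == 10:
--         return 9
--     return 10
--
-- def starting(x, y, n, m, board):
--     cnt = [0] * 11
--     for i in range(19):
--         inx = x - 9 + i
--         for j in range(19):
--             iny = y - 9 + j
--             if inx < 0 or inx >= n or iny < 0 or iny >= m:
--                 continue
--             if board[inx][iny] == '1':
--                 number = score(i, j)
--                 cnt[number] += 1
--                 if cnt[number] >= 2:
--                     return False
--     for i in range(1, 11):
--         if cnt[i] < 1:
--             return False
--     return True
-- ===== SOURCE B (Python) =====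
-- def starting(x, y, n, m, board):
--     scores = sorted(
--         min(i, 18 - i, j, 18 - j) + 1
--         for i in range(19)
--         for j in range(19)
--         if 0 <= x - 9 + i < n and 0 <= y - 9 + j < m and board[x - 9 + i][y - 9 + j] == '1'
--     )
--     return scores == list(range(1, 11))
-- ===== Notes on version B (the rewrite author's own statement) =====
-- stated objective: simpler
-- what changed: B replaces A's 10-branch score cascade by the closed form min(i, 18-i, j, 18-j) + 1 and replaces the count array with its two early-exit loops by collecting the scores of marked in-window cells in one comprehension and comparing them, sorted, to list(range(1, 11)).
-- outside the precondition, e.g. on starting(9, 1, 2, 3, [['1', 'x', '1']]): A returns False, B raises IndexError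
import Mathlib
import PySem

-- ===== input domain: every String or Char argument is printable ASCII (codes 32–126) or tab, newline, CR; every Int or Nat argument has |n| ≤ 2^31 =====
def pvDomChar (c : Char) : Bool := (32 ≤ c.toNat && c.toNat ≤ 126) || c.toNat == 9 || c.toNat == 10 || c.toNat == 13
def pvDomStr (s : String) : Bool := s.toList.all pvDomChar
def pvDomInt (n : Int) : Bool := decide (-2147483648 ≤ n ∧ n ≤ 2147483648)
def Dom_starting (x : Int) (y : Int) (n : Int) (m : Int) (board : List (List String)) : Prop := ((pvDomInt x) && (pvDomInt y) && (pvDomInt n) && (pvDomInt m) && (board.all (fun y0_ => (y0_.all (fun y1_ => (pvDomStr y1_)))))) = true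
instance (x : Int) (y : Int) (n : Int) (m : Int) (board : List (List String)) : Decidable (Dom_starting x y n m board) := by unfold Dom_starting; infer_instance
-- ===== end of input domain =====

-- B replaces A's score cascade + count-array cascade by the closed form min(i,18-i,j,18-j)+1
-- collected in a comprehension and compared after sorting to [1..10]; objective: simpler.
-- (pyGetD is exact for board[inx][iny] under Pre_starting, which says those indexings are in range.)


-- ===== PORT A =====
def score (x : Int) (y : Int) : Int :=
  if x = 0 ∨ x = 18 ∨ y = 0 ∨ y = 18 then 1
  else if x = 1 ∨ x = 17 ∨ y = 1 ∨ y = 17 then 2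
  else if x = 2 ∨ x = 16 ∨ y = 2 ∨ y = 16 then 3
  else if x = 3 ∨ x = 15 ∨ y = 3 ∨ y = 15 then 4
  else if x = 4 ∨ x = 14 ∨ y = 4 ∨ y = 14 then 5
  else if x = 5 ∨ x = 13 ∨ y = 5 ∨ y = 13 then 6
  else if x = 6 ∨ x = 12 ∨ y = 6 ∨ y = 12 then 7
  else if x = 7 ∨ x = 11 ∨ y = 7 ∨ y = 11 then 8
  else if x = 8 ∨ x = 10 ∨ y = 8 ∨ y = 10 then 9
  else 10

-- the nested loop with its two early 'return False's, threaded as an Except state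
def starting (x : Int) (y : Int) (n : Int) (m : Int) (board : List (List String)) : Bool :=
  let cnt0 : List Int := List.replicate 11 0
  let res : Except Bool (List Int) :=
    (PySem.List.pyRange 0 19 1).foldl (fun st i =>
      match st with
      | .error b => .error b
      | .ok cnt =>
        (PySem.List.pyRange 0 19 1).foldl (fun st2 j =>
          match st2 with
          | .error b => .error b
          | .ok cnt =>
            let inx := x - 9 + i
            let iny := y - 9 + j
            if inx < 0 ∨ inx ≥ n ∨ iny < 0 ∨ iny ≥ m then .ok cnt
            else if PySem.List.pyGetD (PySem.List.pyGetD board inx []) iny "" == "1" then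
              let number := score i j
              let cnt' := PySem.List.pySetD cnt number (PySem.List.pyGetD cnt number 0 + 1)
              if 2 ≤ PySem.List.pyGetD cnt' number 0 then .error false else .ok cnt'
            else .ok cnt) (.ok cnt)) (.ok cnt0)
  match res with
  | .error b => b
  | .ok cnt => (PySem.List.pyRange 1 11 1).all (fun i => !(PySem.List.pyGetD cnt i 0 < 1))

-- ===== PORT B =====
def starting_alt (x : Int) (y : Int) (n : Int) (m : Int) (board : List (List String)) : Bool :=
  let scores : List Int :=
    PySem.List.sorted
      ((PySem.List.pyRange 0 19 1).flatMap (fun i =>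
        (((PySem.List.pyRange 0 19 1).filter (fun j =>
            decide (0 ≤ x - 9 + i ∧ x - 9 + i < n ∧ 0 ≤ y - 9 + j ∧ y - 9 + j < m) &&
            (PySem.List.pyGetD (PySem.List.pyGetD board (x - 9 + i) []) (y - 9 + j) "" == "1"))).map
          (fun j => min (min (min i (18 - i)) j) (18 - j) + 1))))
      id false
  scores == PySem.List.pyRange 1 11 1

-- ===== PRECONDITION & SPEC =====
-- Pre_: every in-window cell that passes A's bounds test (0 ≤ inx < n, 0 ≤ iny < m) actually
-- exists in `board`; outside this, board[inx][iny] raises IndexError in Python — except on a few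
-- inputs where A's early duplicate exit returns False before reaching the missing cell (see cites).
def Pre_starting (x : Int) (y : Int) (n : Int) (m : Int) (board : List (List String)) : Prop :=
  ∀ i ∈ PySem.List.pyRange 0 19 1, ∀ j ∈ PySem.List.pyRange 0 19 1,
    (0 ≤ x - 9 + i ∧ x - 9 + i < n ∧ 0 ≤ y - 9 + j ∧ y - 9 + j < m) →
    ((x - 9 + i).toNat < board.length ∧
     (y - 9 + j).toNat < (board.getD (x - 9 + i).toNat []).length)
instance (x : Int) (y : Int) (n : Int) (m : Int) (board : List (List String)) : Decidable (Pre_starting x y n m board) := by unfold Pre_starting; infer_instance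

def pvWitness_starting : Int × Int × Int × Int × List (List String) := (9, 9, 0, 0, [])

def Spec_starting (x : Int) (y : Int) (n : Int) (m : Int) (board : List (List String)) (out : Bool) : Prop := out = starting_alt x y n m board
instance (x : Int) (y : Int) (n : Int) (m : Int) (board : List (List String)) (out : Bool) : Decidable (Spec_starting x y n m board out) := by unfold Spec_starting; infer_instance

-- ===== CLAIM (what is proved, stated in full; the proofs are below) =====
def Claim_equal_starting : Prop := ∀ (x : Int) (y : Int) (n : Int) (m : Int) (board : List (List String)), Dom_starting x y n m board → Pre_starting x y n m board → Spec_starting x y n m board (starting x y n m board)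

-- ===== LEMMAS AND PROOFS =====

-- the body of A's duplicate test, as a named step on the count list
def pvStep (v : Int) (c : List Int) : Except Bool (List Int) :=
  let c' := PySem.List.pySetD c v (PySem.List.pyGetD c v 0 + 1)
  if 2 ≤ PySem.List.pyGetD c' v 0 then .error false else .ok c'

-- A's counting loop, abstracted to the list of scores it processes
def pvRun : List Int → List Int → Except Bool (List Int)
  | [], c => .ok c
  | v :: vs, c =>
    match pvStep v c with
    | .error b => .error b
    | .ok c' => pvRun vs c'

def pvOut (r : Except Bool (List Int)) : Bool :=
  match r with
  | .error b => b
  | .ok cnt => (PySem.List.pyRange 1 11 1).all (fun i => !(PySem.List.pyGetD cnt i 0 < 1))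

def pvQ (x y n m : Int) (board : List (List String)) (i j : Int) : Bool :=
  (!decide (x - 9 + i < 0 ∨ x - 9 + i ≥ n ∨ y - 9 + j < 0 ∨ y - 9 + j ≥ m)) &&
  (PySem.List.pyGetD (PySem.List.pyGetD board (x - 9 + i) []) (y - 9 + j) "" == "1")

def pvVals (x y n m : Int) (board : List (List String)) : List Int :=
  (PySem.List.pyRange 0 19 1).flatMap (fun i =>
    ((PySem.List.pyRange 0 19 1).filter (pvQ x y n m board i)).map (score i))

theorem pvRun_append (u w : List Int) (c : List Int) :
    pvRun (u ++ w) c = match pvRun u c with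
      | .error b => .error b
      | .ok c' => pvRun w c' := by
  induction u generalizing c with
  | nil => rfl
  | cons v vs ih =>
    simp only [List.cons_append, pvRun]
    cases pvStep v c with
    | error b => rfl
    | ok c' => exact ih c'

theorem pv_foldl_inner (l : List Int) (q : Int → Bool) (sc : Int → Int)
    (st : Except Bool (List Int)) :
    l.foldl (fun st j =>
      match st with
      | .error b => .error b
      | .ok c => if q j then pvStep (sc j) c else .ok c) st
    = match st with
      | .error b => .error b
      | .ok c => pvRun ((l.filter q).map sc) c := by
  induction l generalizing st with
  | nil => cases st <;> rfl
  | cons j js ih =>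
    cases st with
    | error b => rw [List.foldl_cons, ih]
    | ok c =>
      rw [List.foldl_cons, ih, List.filter_cons]
      by_cases h : q j
      · simp only [h, if_true, List.map_cons, pvRun]
      · simp only [h, Bool.false_eq_true, if_false]

theorem pv_foldl_outer (l : List Int) (vr : Int → List Int) (st : Except Bool (List Int)) :
    l.foldl (fun st i =>
      match st with
      | .error b => .error b
      | .ok c => pvRun (vr i) c) st
    = match st with
      | .error b => .error b
      | .ok c => pvRun (l.flatMap vr) c := by
  induction l generalizing st with
  | nil => cases st <;> rfl
  | cons i is ih =>
    cases st with
    | error b => rw [List.foldl_cons, ih]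
    | ok c =>
      rw [List.foldl_cons, ih, List.flatMap_cons]
      exact (pvRun_append (vr i) (List.flatMap vr is) c).symm

theorem pv_starting_eq (x y n m : Int) (board : List (List String)) :
    starting x y n m board = pvOut (pvRun (pvVals x y n m board) (List.replicate 11 0)) := by
  unfold starting
  have hstep : ∀ i : Int,
      (fun (st2 : Except Bool (List Int)) (j : Int) =>
        match st2 with
        | Except.error b => Except.error b
        | Except.ok cnt =>
          if x - 9 + i < 0 ∨ x - 9 + i ≥ n ∨ y - 9 + j < 0 ∨ y - 9 + j ≥ m then Except.ok cnt
          else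
            if (PySem.List.pyGetD (PySem.List.pyGetD board (x - 9 + i) []) (y - 9 + j) "" == "1") = true then
              if 2 ≤ PySem.List.pyGetD
                  (PySem.List.pySetD cnt (score i j) (PySem.List.pyGetD cnt (score i j) 0 + 1))
                  (score i j) 0 then
                Except.error false
              else Except.ok (PySem.List.pySetD cnt (score i j) (PySem.List.pyGetD cnt (score i j) 0 + 1))
            else Except.ok cnt)
      = (fun (st2 : Except Bool (List Int)) (j : Int) =>
        match st2 with
        | Except.error b => Except.error b
        | Except.ok c => if pvQ x y n m board i j then pvStep (score i j) c else Except.ok c) := by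
    intro i; funext st j
    cases st with
    | error b => rfl
    | ok c =>
      by_cases h1 : x - 9 + i < 0 ∨ x - 9 + i ≥ n ∨ y - 9 + j < 0 ∨ y - 9 + j ≥ m
      · simp [pvQ, h1]
      · by_cases h2 : PySem.List.pyGetD (PySem.List.pyGetD board (x - 9 + i) []) (y - 9 + j) "" == "1"
        · simp only [pvQ, h1, decide_false, Bool.not_false, Bool.true_and, h2, if_true, if_false,
            pvStep]
        · simp [pvQ, h1, h2]
  simp only [hstep, pv_foldl_inner]
  show pvOut ((PySem.List.pyRange 0 19 1).foldl (fun st i =>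
      match st with
      | Except.error b => Except.error b
      | Except.ok cnt =>
        pvRun (List.map (score i) (List.filter (pvQ x y n m board i) (PySem.List.pyRange 0 19 1))) cnt)
      (Except.ok (List.replicate 11 0)))
    = pvOut (pvRun (pvVals x y n m board) (List.replicate 11 0))
  exact congrArg pvOut (pv_foldl_outer (PySem.List.pyRange 0 19 1)
    (fun i => List.map (score i) (List.filter (pvQ x y n m board i) (PySem.List.pyRange 0 19 1)))
    (Except.ok (List.replicate 11 0)))

-- pyGetD after pySetD, both indices nonneg and in range
theorem pv_getD_setD (c : List Int) (v k w : Int) (hv0 : 0 ≤ v) (hv : v.toNat < c.length)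
    (hk0 : 0 ≤ k) (hk : k.toNat < c.length) :
    PySem.List.pyGetD (PySem.List.pySetD c v w) k 0
      = if k = v then w else PySem.List.pyGetD c k 0 := by
  rw [PySem.List.pySetD_of_nonneg c w hv0]
  rw [PySem.List.pyGetD_eq_getElem _ _ hk0 (by simp; omega)]
  rw [List.getElem_set]
  by_cases h : k = v
  · simp [h]
  · have hne : ¬ v.toNat = k.toNat := by omega
    rw [if_neg hne, if_neg h, PySem.List.pyGetD_eq_getElem _ _ hk0 (by omega)]

theorem pv_getD_replicate (k : Int) (hk0 : 0 ≤ k) (hk : k.toNat < 11) :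
    PySem.List.pyGetD (List.replicate 11 (0 : Int)) k 0 = 0 := by
  rw [PySem.List.pyGetD_eq_getElem _ _ hk0 (by simp; omega)]
  exact List.getElem_replicate _

theorem pv_machine (vals : List Int) (cnt : List Int)
    (hlen : cnt.length = 11)
    (hv : ∀ v ∈ vals, 1 ≤ v ∧ v ≤ 10)
    (h01 : ∀ k : Int, 1 ≤ k → k ≤ 10 →
      PySem.List.pyGetD cnt k 0 = 0 ∨ PySem.List.pyGetD cnt k 0 = 1) :
    pvOut (pvRun vals cnt)
    = decide (∀ k : Int, 1 ≤ k → k ≤ 10 →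
        PySem.List.pyGetD cnt k 0 + vals.count k = 1) := by
  induction vals generalizing cnt with
  | nil =>
    simp only [pvRun, pvOut, List.count_nil]
    rw [Bool.eq_iff_iff]
    simp only [List.all_eq_true, PySem.List.mem_pyRange_one, Bool.not_eq_eq_eq_not,
      Bool.not_true, decide_eq_false_iff_not, not_lt, decide_eq_true_eq]
    constructor
    · intro h k h1 h10
      rcases h01 k h1 h10 with h0 | h0
      · have := h k ⟨h1, by omega⟩; omega
      · omega
    · intro h k hk
      have := h k hk.1 (by omega); omega
  | cons v vs ih =>
    obtain ⟨hv1, hv10⟩ := hv v (List.mem_cons_self ..)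
    have hvlen : v.toNat < cnt.length := by rw [hlen]; omega
    have hset : ∀ k : Int, 0 ≤ k → k.toNat < cnt.length →
        PySem.List.pyGetD (PySem.List.pySetD cnt v (PySem.List.pyGetD cnt v 0 + 1)) k 0
        = if k = v then PySem.List.pyGetD cnt v 0 + 1 else PySem.List.pyGetD cnt k 0 :=
      fun k hk0 hk => pv_getD_setD cnt v k _ (by omega) hvlen hk0 hk
    simp only [pvRun, pvStep]
    rw [hset v (by omega) hvlen, if_pos rfl]
    rcases h01 v hv1 hv10 with h0 | h0
    · rw [if_neg (show ¬ 2 ≤ PySem.List.pyGetD cnt v 0 + 1 by omega)]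
      show pvOut (pvRun vs (PySem.List.pySetD cnt v (PySem.List.pyGetD cnt v 0 + 1))) = _
      rw [ih (PySem.List.pySetD cnt v (PySem.List.pyGetD cnt v 0 + 1))
        (by rw [PySem.List.pySetD_of_nonneg _ _ (by omega)]; simp [hlen])
        (fun w hw => hv w (List.mem_cons_of_mem _ hw))
        (by
          intro k h1 h10
          rw [hset k (by omega) (by omega)]
          by_cases hkv : k = v
          · rw [if_pos hkv]; right; omega
          · rw [if_neg hkv]; exact h01 k h1 h10)]
      rw [decide_eq_decide]
      constructor
      · intro h k h1 h10
        have := h k h1 h10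
        rw [hset k (by omega) (by omega)] at this
        rw [List.count_cons]
        by_cases hkv : k = v
        · subst hkv; rw [if_pos rfl] at this; simp only [beq_self_eq_true, if_true]; omega
        · rw [if_neg hkv] at this
          have : (v == k) = false := by simp [Ne.symm hkv]
          simp only [this, Bool.false_eq_true, if_false]; omega
      · intro h k h1 h10
        have := h k h1 h10
        rw [List.count_cons] at this
        rw [hset k (by omega) (by omega)]
        by_cases hkv : k = v
        · subst hkv; rw [if_pos rfl]; simp only [beq_self_eq_true, if_true] at this; omega
        · rw [if_neg hkv]
          have hb : (v == k) = false := by simp [Ne.symm hkv]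
          rw [hb] at this; simp at this; omega
    · rw [if_pos (show 2 ≤ PySem.List.pyGetD cnt v 0 + 1 by omega)]
      show (false : Bool) = _
      symm
      rw [decide_eq_false_iff_not]
      intro h
      have := h v hv1 hv10
      rw [List.count_cons, if_pos (by simp)] at this
      omega

theorem pv_count_perm (vals : List Int) (hv : ∀ v ∈ vals, 1 ≤ v ∧ v ≤ 10) :
    (∀ k : Int, 1 ≤ k → k ≤ 10 → vals.count k = 1) ↔ vals.Perm (PySem.List.pyRange 1 11 1) := by
  rw [List.perm_iff_count]
  constructor
  · intro h a
    by_cases ha : 1 ≤ a ∧ a ≤ 10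
    · rw [h a ha.1 ha.2,
        List.count_eq_one_of_mem (PySem.List.nodup_pyRange_one 1 11)
          (PySem.List.mem_pyRange_one.mpr ⟨ha.1, by omega⟩)]
    · rw [List.count_eq_zero.mpr (fun hm => ha (hv a hm)),
        List.count_eq_zero.mpr (fun hm => ha (by
          have := PySem.List.mem_pyRange_one.mp hm; exact ⟨this.1, by omega⟩))]
  · intro h k h1 h10
    rw [h k]
    exact List.count_eq_one_of_mem (PySem.List.nodup_pyRange_one 1 11)
      (PySem.List.mem_pyRange_one.mpr ⟨h1, by omega⟩)

theorem pv_sorted_iff (vals : List Int) :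
    (PySem.List.sorted vals id false = PySem.List.pyRange 1 11 1)
      ↔ vals.Perm (PySem.List.pyRange 1 11 1) := by
  constructor
  · intro h
    rw [← h]
    exact (PySem.List.sorted_perm vals id false).symm
  · intro h
    exact PySem.List.sorted_eq_of_perm_of_pairwise_lt vals _ id h.symm
      (by simpa using PySem.List.pairwise_lt_pyRange_one 1 11)

theorem pv_score_facts :
    ((PySem.List.pyRange 0 19 1).all fun i => (PySem.List.pyRange 0 19 1).all fun j =>
      decide (1 ≤ score i j) && decide (score i j ≤ 10) &&
      decide (score i j = min (min (min i (18 - i)) j) (18 - j) + 1)) = true := by decide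

theorem pv_score_bounds {i j : Int} (hi : i ∈ PySem.List.pyRange 0 19 1)
    (hj : j ∈ PySem.List.pyRange 0 19 1) :
    1 ≤ score i j ∧ score i j ≤ 10 ∧
      score i j = min (min (min i (18 - i)) j) (18 - j) + 1 := by
  have h := pv_score_facts
  rw [List.all_eq_true] at h
  have h := h i hi
  rw [List.all_eq_true] at h
  have h := h j hj
  simp only [Bool.and_eq_true, decide_eq_true_eq] at h
  exact ⟨h.1.1, h.1.2, h.2⟩

theorem pv_vals_mem (x y n m : Int) (board : List (List String)) :
    ∀ v ∈ pvVals x y n m board, 1 ≤ v ∧ v ≤ 10 := by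
  intro v hv
  simp only [pvVals, List.mem_flatMap, List.mem_map, List.mem_filter] at hv
  obtain ⟨i, hi, j, ⟨hj, _⟩, rfl⟩ := hv
  exact ⟨(pv_score_bounds hi hj).1, (pv_score_bounds hi hj).2.1⟩

theorem pv_flatMap_congr {α β : Type} (l : List α) (f g : α → List β)
    (h : ∀ a ∈ l, f a = g a) : l.flatMap f = l.flatMap g := by
  induction l with
  | nil => rfl
  | cons a as ih =>
    rw [List.flatMap_cons, List.flatMap_cons, h a (List.mem_cons_self ..),
      ih (fun a ha => h a (List.mem_cons_of_mem _ ha))]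

theorem pv_alt_eq (x y n m : Int) (board : List (List String)) :
    starting_alt x y n m board
      = (PySem.List.sorted (pvVals x y n m board) id false == PySem.List.pyRange 1 11 1) := by
  unfold starting_alt
  have : ((PySem.List.pyRange 0 19 1).flatMap (fun i =>
      (((PySem.List.pyRange 0 19 1).filter (fun j =>
          decide (0 ≤ x - 9 + i ∧ x - 9 + i < n ∧ 0 ≤ y - 9 + j ∧ y - 9 + j < m) &&
          (PySem.List.pyGetD (PySem.List.pyGetD board (x - 9 + i) []) (y - 9 + j) "" == "1"))).map
        (fun j => min (min (min i (18 - i)) j) (18 - j) + 1))))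
      = pvVals x y n m board := by
    unfold pvVals
    apply pv_flatMap_congr
    intro i hi
    have hfil : (PySem.List.pyRange 0 19 1).filter (fun j =>
        decide (0 ≤ x - 9 + i ∧ x - 9 + i < n ∧ 0 ≤ y - 9 + j ∧ y - 9 + j < m) &&
        (PySem.List.pyGetD (PySem.List.pyGetD board (x - 9 + i) []) (y - 9 + j) "" == "1"))
        = (PySem.List.pyRange 0 19 1).filter (pvQ x y n m board i) := by
      apply List.filter_congr
      intro j _
      unfold pvQ
      congr 1
      rw [Bool.eq_iff_iff]
      simp only [decide_eq_true_eq, Bool.not_eq_eq_eq_not, Bool.not_true,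
        decide_eq_false_iff_not]
      omega
    rw [hfil]
    apply List.map_congr_left
    intro j hj
    exact ((pv_score_bounds hi (List.mem_filter.mp hj).1).2.2).symm
  rw [this]

-- ===== VERDICT (by name: the statement is the Claim_ definition above) =====
theorem starting_spec : Claim_equal_starting := by
  intro x y n m board _ _
  unfold Spec_starting
  rw [pv_starting_eq, pv_alt_eq]
  rw [pv_machine _ _ (by simp) (pv_vals_mem x y n m board)
    (fun k h1 h10 => Or.inl (pv_getD_replicate k (by omega) (by omega)))]
  rw [Bool.eq_iff_iff]
  simp only [decide_eq_true_eq, beq_iff_eq]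
  rw [pv_sorted_iff, ← pv_count_perm _ (pv_vals_mem x y n m board)]
  constructor
  · intro h k h1 h10
    have := h k h1 h10
    rw [pv_getD_replicate k (by omega) (by omega)] at this
    omega
  · intro h k h1 h10
    rw [pv_getD_replicate k (by omega) (by omega)]
    have := h k h1 h10
    omega
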